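-- pv_equiv track=rewrite | github.com/vigneshsabapathi/python-algorithms | maths/germain_primes_optimized.py | germain_trial
-- ===== SOURCE A (Python) =====
-- def germain_trial(limit):
--     def is_prime(n):
--         if n < 2:
--             return False
--         if n < 4:
--             return True
--         if n % 2 == 0:
--             return False
--         i = 3
--         while i * i <= n:
--             if n % i == 0:
--                 return False
--             i += 2
--         return True
--
--     return [p for p in range(2, limit + 1) if is_prime(p) and is_prime(2 * p + 1)]
-- ===== SOURCE B (Python) =====
-- def germain_trial(limit):
--     n = 2 * limit + 1
--     if n < 2:
--         return []
--     sieve = [True] * (n + 1)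
--     sieve[0] = False
--     sieve[1] = False
--     for d in range(2, n + 1):
--         if sieve[d]:
--             for m in range(d * d, n + 1, d):
--                 sieve[m] = False
--     return [p for p in range(2, limit + 1) if sieve[p] and sieve[2 * p + 1]]
-- ===== Notes on version B (the rewrite author's own statement) =====
-- stated objective: faster
-- what changed: A trial-divides each candidate and its safe-prime partner up to their square roots; B builds one Sieve of Eratosthenes boolean table covering every partner value and then filters the candidate range with two table lookups per candidate.
import Mathlib
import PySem

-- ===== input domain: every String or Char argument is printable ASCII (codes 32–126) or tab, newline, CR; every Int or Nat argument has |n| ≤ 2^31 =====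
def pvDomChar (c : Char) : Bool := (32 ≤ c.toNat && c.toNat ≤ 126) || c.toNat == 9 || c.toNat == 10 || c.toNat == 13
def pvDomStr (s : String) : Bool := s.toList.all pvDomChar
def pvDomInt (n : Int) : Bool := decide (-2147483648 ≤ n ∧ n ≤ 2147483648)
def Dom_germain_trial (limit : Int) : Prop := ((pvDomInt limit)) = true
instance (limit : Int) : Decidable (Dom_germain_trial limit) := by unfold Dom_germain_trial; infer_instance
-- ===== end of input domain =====

-- B replaces A's per-candidate trial division by one Sieve of Eratosthenes up to 2*limit+1
-- followed by a linear filter (objective: faster).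

-- ===== PORT A =====
-- termination helper for A's `while i * i <= n` loop (cited by decreasing_by)
theorem pvSqLe {i n : Int} (h : i * i ≤ n) : i ≤ n := by
  by_cases h0 : i ≤ 0
  · nlinarith [mul_self_nonneg i]
  · nlinarith

-- A's inner `while i * i <= n: if n % i == 0: return False; i += 2`
def isPrimeLoopA (n i : Int) : Bool :=
  if h : i * i ≤ n then
    if PySem.Int.mod n i = 0 then false
    else isPrimeLoopA n (i + 2)
  else true
termination_by (n + 1 - i).toNat
decreasing_by have := pvSqLe h; omega

-- A's local helper `is_prime`
def isPrimeA (n : Int) : Bool :=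
  if n < 2 then false
  else if n < 4 then true
  else if PySem.Int.mod n 2 = 0 then false
  else isPrimeLoopA n 3

def germain_trial (limit : Int) : List Int :=
  (PySem.List.pyRange 2 (limit + 1) 1).filter (fun p => isPrimeA p && isPrimeA (2 * p + 1))

-- ===== PORT B =====
-- body of B's outer `for d in range(2, n + 1)` loop
def markStep (n : Int) (s : List Bool) (d : Int) : List Bool :=
  if PySem.List.pyGetD s d false then
    (PySem.List.pyRange (d * d) (n + 1) d).foldl (fun s' m => PySem.List.pySetD s' m false) s
  else s

def germain_trial_alt (limit : Int) : List Int :=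
  let n := 2 * limit + 1
  if n < 2 then []
  else
    let sieve0 := PySem.List.pySetD (PySem.List.pySetD (List.replicate (n + 1).toNat true) 0 false) 1 false
    let sieve := (PySem.List.pyRange 2 (n + 1) 1).foldl (markStep n) sieve0
    (PySem.List.pyRange 2 (limit + 1) 1).filter
      (fun p => PySem.List.pyGetD sieve p false && PySem.List.pyGetD sieve (2 * p + 1) false)

-- ===== PRECONDITION & SPEC =====
def Spec_germain_trial (limit : Int) (out : List Int) : Prop := out = germain_trial_alt limit
instance (limit : Int) (out : List Int) : Decidable (Spec_germain_trial limit out) := by unfold Spec_germain_trial; infer_instance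

-- ===== CLAIM (what is proved, stated in full; the proofs are below) =====
def Claim_equal_germain_trial : Prop := ∀ (limit : Int), Dom_germain_trial limit → Spec_germain_trial limit (germain_trial limit)

-- ===== LEMMAS AND PROOFS =====

-- model of the sieve: has j a prime factor p < D with p*p ≤ j?
def exPFb (D j : ℕ) : Bool :=
  (List.range D).any fun p => decide p.Prime && decide (p ∣ j) && decide (p * p ≤ j)

def sieveSpec (D j : ℕ) : Bool := decide (2 ≤ j) && !exPFb D j

lemma exPFb_iff (D j : ℕ) : exPFb D j = true ↔ ∃ p, p.Prime ∧ p < D ∧ p ∣ j ∧ p * p ≤ j := by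
  simp only [exPFb, List.any_eq_true, List.mem_range, Bool.and_eq_true, decide_eq_true_eq]
  tauto

lemma exPFb_succ (D j : ℕ) :
    exPFb (D + 1) j = (exPFb D j || (decide D.Prime && decide (D ∣ j) && decide (D * D ≤ j))) := by
  simp [exPFb, List.range_succ]

lemma sieveSpec_succ (D j : ℕ) :
    sieveSpec (D + 1) j = (sieveSpec D j && !(decide D.Prime && decide (D ∣ j) && decide (D * D ≤ j))) := by
  simp [sieveSpec, exPFb_succ, Bool.not_or, Bool.and_assoc]

-- a number 2 ≤ j ≤ B is composite iff it has a prime factor p < B with p*p ≤ j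
lemma not_prime_iff (j B : ℕ) (hj : 2 ≤ j) (hB : j ≤ B) :
    (∃ p, p.Prime ∧ p < B ∧ p ∣ j ∧ p * p ≤ j) ↔ ¬ j.Prime := by
  constructor
  · rintro ⟨p, hp, _, hdvd, hsq⟩ hPj
    rcases (hPj.eq_one_or_self_of_dvd p hdvd) with h1 | h1
    · exact absurd h1 (Nat.Prime.ne_one hp)
    · subst h1; nlinarith [hp.two_le]
  · intro hnp
    have hsq := Nat.minFac_sq_le_self (n := j) (by omega) hnp
    have hsq' : j.minFac * j.minFac ≤ j := by nlinarith [sq j.minFac]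
    have h2 := (Nat.minFac_prime (n := j) (by omega)).two_le
    refine ⟨j.minFac, Nat.minFac_prime (by omega), ?_, Nat.minFac_dvd j, hsq'⟩
    nlinarith

lemma sieveSpec_eq_prime (j B : ℕ) (hB : j ≤ B) :
    sieveSpec B j = decide (2 ≤ j ∧ j.Prime) := by
  unfold sieveSpec
  by_cases hj : 2 ≤ j
  · have h := not_prime_iff j B hj hB
    rw [← exPFb_iff] at h
    have hx : exPFb B j = decide (¬ j.Prime) := by
      by_cases hP : j.Prime
      · cases hbb : exPFb B j
        · simp [hP]
        · exact absurd (h.mp hbb) (not_not_intro hP)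
      · have hd : decide (¬ j.Prime) = true := by simp [hP]
        rw [hd]
        exact h.mpr hP
    rw [hx]
    by_cases hP : j.Prime <;> simp [hP, hj]
  · simp [hj]

-- the inner marking fold, characterised pointwise
lemma foldl_setFalse_length (xs : List Int) (s : List Bool) :
    (xs.foldl (fun a m => PySem.List.pySetD a m false) s).length = s.length := by
  induction xs generalizing s with
  | nil => rfl
  | cons m xs ih => simp [List.foldl_cons, ih, PySem.List.length_pySetD]

lemma foldl_setFalse_getElem? (xs : List Int) (hx : ∀ m ∈ xs, 0 ≤ m) (s : List Bool) (j : ℕ) :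
    (xs.foldl (fun a m => PySem.List.pySetD a m false) s)[j]? =
      if (j : Int) ∈ xs ∧ j < s.length then some false else s[j]? := by
  induction xs generalizing s with
  | nil => simp
  | cons m xs ih =>
    have hm0 : 0 ≤ m := hx m (List.mem_cons_self ..)
    rw [List.foldl_cons, ih (fun x hx' => hx x (List.mem_cons_of_mem _ hx')),
        PySem.List.pySetD_of_nonneg _ _ hm0, List.length_set, List.getElem?_set]
    simp only [List.mem_cons]
    by_cases hjm : (j : Int) = m
    · have hjt : m.toNat = j := by omega
      by_cases hlen : j < s.length
      · simp [hjt, hjm, hlen]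
      · simp [hjt, hjm, hlen]
    · have hjt : ¬ m.toNat = j := fun h => hjm (by omega)
      simp [hjt, hjm]

lemma markStep_length (n : Int) (s : List Bool) (d : Int) :
    (markStep n s d).length = s.length := by
  unfold markStep
  split
  · exact foldl_setFalse_length _ _
  · rfl

lemma foldl_markStep_length (n : Int) (l : List Int) (s : List Bool) :
    (l.foldl (markStep n) s).length = s.length := by
  induction l generalizing s with
  | nil => rfl
  | cons d l ih => simp [List.foldl_cons, ih, markStep_length]

-- the initial sieve [True]*(n+1) with cells 0 and 1 cleared
lemma sieve0_getElem? (n : Int) (hn : 2 ≤ n) (j : ℕ) :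
    (PySem.List.pySetD (PySem.List.pySetD (List.replicate (n + 1).toNat true) 0 false) 1 false)[j]? =
      if j < (n + 1).toNat then some (sieveSpec 2 j) else none := by
  have hex : ∀ j : ℕ, exPFb 2 j = false := by
    intro j
    simp [exPFb, show List.range 2 = [0, 1] from rfl, Nat.not_prime_zero, Nat.not_prime_one]
  have hS : 3 ≤ (n + 1).toNat := by omega
  rw [PySem.List.pySetD_of_nonneg _ _ (by omega : (0:Int) ≤ 0),
      PySem.List.pySetD_of_nonneg _ _ (by omega : (0:Int) ≤ 1)]
  have h0 : (0 : Int).toNat = 0 := rfl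
  have h1 : (1 : Int).toNat = 1 := rfl
  rw [h0, h1, List.getElem?_set, List.length_set, List.getElem?_set, List.length_replicate,
      List.getElem?_replicate]
  by_cases hj0 : j = 0
  · subst hj0
    simp [sieveSpec, show 0 < (n+1).toNat by omega]
  · by_cases hj1 : j = 1
    · subst hj1
      simp [sieveSpec, show 1 < (n+1).toNat by omega]
    · by_cases hj : j < (n + 1).toNat
      · rw [if_neg (by omega), if_neg (by omega), if_pos hj, if_pos hj]
        simp [sieveSpec, hex, show 2 ≤ j by omega]
      · rw [if_neg (by omega), if_neg (by omega), if_neg hj, if_neg hj]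

-- main invariant: after the outer loop has processed d = 2 .. D-1, cell j holds sieveSpec D j
lemma sieve_inv (n : Int) (hn : 2 ≤ n) (D : ℕ) (hD2 : 2 ≤ D) :
    (D : Int) ≤ n + 1 → ∀ j : ℕ,
      ((PySem.List.pyRange 2 (D : Int) 1).foldl (markStep n)
        (PySem.List.pySetD (PySem.List.pySetD (List.replicate (n + 1).toNat true) 0 false) 1 false))[j]? =
      if j < (n + 1).toNat then some (sieveSpec D j) else none := by
  induction D, hD2 using Nat.le_induction with
  | base =>
    intro _ j
    have h2 : ((2 : ℕ) : Int) = 2 := by norm_num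
    rw [h2, PySem.List.pyRange_one_eq_nil (le_refl 2), List.foldl_nil]
    exact sieve0_getElem? n hn j
  | succ D hD2 ih =>
    intro hDn j
    have hDn' : (D : Int) ≤ n := by push_cast at hDn ⊢; omega
    rw [show (((D + 1 : ℕ)) : Int) = (D : Int) + 1 by push_cast; ring,
        PySem.List.pyRange_one_succ_right (by exact_mod_cast hD2), List.foldl_append,
        List.foldl_cons, List.foldl_nil]
    have ihh := ih (by omega)
    set prev := ((PySem.List.pyRange 2 (D : Int) 1).foldl (markStep n)
        (PySem.List.pySetD (PySem.List.pySetD (List.replicate (n + 1).toNat true) 0 false) 1 false)) with hprev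
    have hplen : prev.length = (n + 1).toNat := by
      rw [hprev, foldl_markStep_length]
      simp [PySem.List.length_pySetD]
    have hDlt : D < (n + 1).toNat := by omega
    have hguard : PySem.List.pyGetD prev (D : Int) false = decide D.Prime := by
      rw [PySem.List.pyGetD_natCast, List.getD_eq_getElem?_getD, ihh D, if_pos hDlt]
      simp [sieveSpec_eq_prime D D le_rfl, hD2]
    unfold markStep
    rw [hguard]
    by_cases hP : D.Prime
    · rw [if_pos (by simp [hP])]
      have hDpos : (0 : Int) < (D : Int) := by exact_mod_cast hP.pos
      have hx : ∀ m ∈ PySem.List.pyRange ((D:Int) * D) (n + 1) D, 0 ≤ m := by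
        intro m hm
        have hb := ((PySem.List.mem_pyRange_iff_of_pos hDpos m).mp hm).1
        nlinarith [mul_self_nonneg (D : Int)]
      rw [foldl_setFalse_getElem? _ hx prev j, hplen]
      have hmem : (j : Int) ∈ PySem.List.pyRange ((D:Int) * D) (n + 1) D ↔
          (D * D ≤ j ∧ j < (n + 1).toNat ∧ D ∣ j) := by
        rw [PySem.List.mem_pyRange_iff_of_pos hDpos]
        constructor
        · rintro ⟨h1, h2, h3⟩
          have hd : (D : Int) ∣ (j : Int) := by
            have := dvd_add h3 ⟨(D : Int), rfl⟩
            simpa using this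
          refine ⟨by exact_mod_cast h1, by omega, by exact_mod_cast hd⟩
        · rintro ⟨h1, h2, h3⟩
          refine ⟨by exact_mod_cast h1, by omega, ?_⟩
          have hd : (D : Int) ∣ (j : Int) := by exact_mod_cast h3
          exact dvd_sub hd ⟨(D : Int), rfl⟩
      by_cases hjlt : j < (n + 1).toNat
      · rw [if_pos hjlt]
        by_cases hdj : D * D ≤ j ∧ D ∣ j
        · rw [if_pos ⟨hmem.mpr ⟨hdj.1, ⟨hjlt, hdj.2⟩⟩, hjlt⟩]
          rw [sieveSpec_succ]
          simp [hP, hdj.1, hdj.2]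
        · have hnm : ¬ ((j : Int) ∈ PySem.List.pyRange ((D:Int) * D) (n + 1) D ∧ j < (n + 1).toNat) := by
            rintro ⟨hc, -⟩
            rcases hmem.mp hc with ⟨ha, -, hb⟩
            exact hdj ⟨ha, hb⟩
          rw [if_neg hnm, ihh j, if_pos hjlt, sieveSpec_succ]
          have hcase : ¬ (D ∣ j) ∨ ¬ (D * D ≤ j) := by tauto
          rcases hcase with h | h <;> simp [h]
      · have hnm : ¬ ((j : Int) ∈ PySem.List.pyRange ((D:Int) * D) (n + 1) D ∧ j < (n + 1).toNat) := by
          rintro ⟨hc, -⟩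
          rcases hmem.mp hc with ⟨-, hb, -⟩
          exact hjlt hb
        rw [if_neg hnm, ihh j, if_neg hjlt, if_neg hjlt]
    · rw [if_neg (by simp [hP]), ihh j]
      by_cases hjlt : j < (n + 1).toNat
      · rw [if_pos hjlt, if_pos hjlt, sieveSpec_succ]
        simp [hP]
      · rw [if_neg hjlt, if_neg hjlt]

-- A's trial-division loop, characterised
lemma loop_iff : ∀ (k : ℕ) (n i : Int), (n + 1 - i).toNat ≤ k → 3 ≤ i →
    (isPrimeLoopA n i = true ↔ ∀ j : Int, i ≤ j → j % 2 = i % 2 → j * j ≤ n → ¬ j ∣ n) := by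
  intro k
  induction k with
  | zero =>
    intro n i hk hi
    have hni : n < i := by omega
    rw [isPrimeLoopA, dif_neg (by nlinarith)]
    constructor
    · intro _ j hj _ hsq _
      nlinarith
    · intro _
      rfl
  | succ k ih =>
    intro n i hk hi
    rw [isPrimeLoopA]
    by_cases hle : i * i ≤ n
    · rw [dif_pos hle]
      have hin : i ≤ n := pvSqLe hle
      by_cases hdvd : PySem.Int.mod n i = 0
      · rw [if_pos hdvd]
        simp only [Bool.false_eq_true, false_iff]
        intro hall
        exact hall i le_rfl rfl hle ((PySem.Int.mod_eq_zero_iff_dvd n i).mp hdvd)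
      · rw [if_neg hdvd]
        rw [ih n (i + 2) (by omega) (by omega)]
        constructor
        · intro h j hj hpar hsq hdj
          have hcase : j = i ∨ j = i + 1 ∨ i + 2 ≤ j := by omega
          rcases hcase with rfl | rfl | hge
          · exact hdvd ((PySem.Int.mod_eq_zero_iff_dvd n j).mpr hdj)
          · omega
          · exact h j hge (by omega) hsq hdj
        · intro h j hj hpar hsq
          exact h j (by omega) (by omega) hsq
    · rw [dif_neg hle]
      constructor
      · intro _ j hj _ hsq _
        nlinarith
      · intro _
        rfl

-- trial division by odd j from 3 decides primality of an odd M ≥ 5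
lemma odd_trial (M : ℕ) (h5 : 5 ≤ M) (hodd : M % 2 = 1) :
    (∀ j : Int, 3 ≤ j → j % 2 = 1 → j * j ≤ (M : Int) → ¬ j ∣ (M : Int)) ↔ M.Prime := by
  constructor
  · intro hall
    by_contra hnp
    set p := M.minFac with hpdef
    have hp : p.Prime := Nat.minFac_prime (by omega)
    have hdvd : p ∣ M := Nat.minFac_dvd M
    have hsq : p * p ≤ M := by
      have := Nat.minFac_sq_le_self (n := M) (by omega) hnp
      nlinarith [sq p]
    have hp2 : p ≠ 2 := by
      intro h2
      rw [h2] at hdvd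
      omega
    have hp3 : 3 ≤ p := by have := hp.two_le; omega
    have hpodd : p % 2 = 1 := Nat.odd_iff.mp (hp.odd_of_ne_two hp2)
    exact hall (p : Int) (by exact_mod_cast hp3) (by omega) (by exact_mod_cast hsq)
      (by exact_mod_cast hdvd)
  · intro hP j h3 _ hsq hdvd
    have hj0 : 0 ≤ j := by omega
    have hJ : j = ((j.toNat : ℕ) : Int) := by omega
    rw [hJ] at hdvd hsq
    have hdvd' : j.toNat ∣ M := by exact_mod_cast hdvd
    rcases hP.eq_one_or_self_of_dvd j.toNat hdvd' with h1 | h1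
    · omega
    · rw [h1] at hsq
      have hMM : M * M ≤ M := by exact_mod_cast hsq
      nlinarith

-- A's is_prime computes primality
lemma isPrimeA_correct (m : Int) (hm : 2 ≤ m) : isPrimeA m = decide m.toNat.Prime := by
  unfold isPrimeA
  rw [if_neg (by omega)]
  by_cases h4 : m < 4
  · rw [if_pos h4]
    have hc : m = 2 ∨ m = 3 := by omega
    rcases hc with rfl | rfl <;> decide
  · rw [if_neg h4]
    have hM : m = ((m.toNat : ℕ) : Int) := by omega
    by_cases heven : PySem.Int.mod m 2 = 0
    · rw [if_pos heven]
      have hdvd : (2 : Int) ∣ m := (PySem.Int.mod_eq_zero_iff_dvd m 2).mp heven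
      have hdvd' : 2 ∣ m.toNat := by
        rw [hM] at hdvd
        exact_mod_cast hdvd
      have hnp : ¬ m.toNat.Prime := by
        intro hP
        rcases hP.eq_one_or_self_of_dvd 2 hdvd' with h | h <;> omega
      simp [hnp]
    · rw [if_neg heven]
      have hmod : m % 2 ≠ 0 := by
        intro h
        exact heven (by rw [PySem.Int.mod_eq_emod_of_pos (by norm_num)]; exact h)
      have hModd : m.toNat % 2 = 1 := by omega
      have hM5 : 5 ≤ m.toNat := by omega
      have hloop := loop_iff ((m + 1 - 3).toNat) m 3 le_rfl (by norm_num)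
      have htrial := odd_trial m.toNat hM5 hModd
      rw [← hM] at htrial
      have hiff : isPrimeLoopA m 3 = true ↔ m.toNat.Prime := by
        rw [hloop, ← htrial]
        constructor <;> intro h j a b c <;> exact h j a (by omega) c
      by_cases hP : m.toNat.Prime
      · simp [hiff.mpr hP, hP]
      · have hf : isPrimeLoopA m 3 = false := by
          cases hb : isPrimeLoopA m 3
          · rfl
          · exact absurd (hiff.mp hb) hP
        simp [hf, hP]

-- ===== VERDICT (by name: the statement is the Claim_ definition above) =====
theorem germain_trial_spec : Claim_equal_germain_trial := by
  intro limit _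
  unfold Spec_germain_trial
  by_cases hl : 2 * limit + 1 < 2
  · simp only [germain_trial, germain_trial_alt, if_pos hl]
    rw [PySem.List.pyRange_one_eq_nil (by omega : limit + 1 ≤ 2)]
    rfl
  · simp only [germain_trial, germain_trial_alt, if_neg hl]
    have hn : (2 : Int) ≤ 2 * limit + 1 := by omega
    have hlim1 : 1 ≤ limit := by omega
    set n : Int := 2 * limit + 1 with hndef
    have hinv : ∀ j : ℕ,
        ((PySem.List.pyRange 2 (n + 1) 1).foldl (markStep n)
          (PySem.List.pySetD (PySem.List.pySetD (List.replicate (n + 1).toNat true) 0 false) 1 false))[j]? =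
        if j < (n + 1).toNat then some (sieveSpec (n + 1).toNat j) else none := by
      intro j
      have h := sieve_inv n hn (n + 1).toNat (by omega) (by omega) j
      rwa [show (((n + 1).toNat : ℕ) : Int) = n + 1 by omega] at h
    have hget : ∀ q : Int, 0 ≤ q → q ≤ n →
        PySem.List.pyGetD ((PySem.List.pyRange 2 (n + 1) 1).foldl (markStep n)
          (PySem.List.pySetD (PySem.List.pySetD (List.replicate (n + 1).toNat true) 0 false) 1 false)) q false
        = decide (2 ≤ q.toNat ∧ q.toNat.Prime) := by
      intro q hq0 hqn
      rw [PySem.List.pyGetD_of_nonneg _ _ hq0, List.getD_eq_getElem?_getD, hinv q.toNat,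
          if_pos (by omega)]
      simp [sieveSpec_eq_prime q.toNat (n + 1).toNat (by omega)]
    symm
    apply List.filter_congr
    intro p hp
    have hpb := (PySem.List.mem_pyRange_one).mp hp
    have hp2 : 2 ≤ p := hpb.1
    have hpl : p ≤ limit := by omega
    rw [hget p (by omega) (by omega), hget (2 * p + 1) (by omega) (by omega),
        isPrimeA_correct p hp2, isPrimeA_correct (2 * p + 1) (by omega)]
    have e1 : 2 ≤ p.toNat := by omega
    have e2 : 2 ≤ (2 * p + 1).toNat := by omega
    simp [e1, e2]
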